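-- pv_equiv track=rewrite | github.com/AaLexUser/Computer-networks | HW1/scripts/4b-5b.py | count_digits3
-- ===== SOURCE A (Python) =====
-- def count_digits3(arr):
--     counter = 0
--     i = 0
--     prev1 = 2
--     prev2 = 2
--     while i < len(arr):
--         if arr[i] == 0 and prev1 == 0 and prev2 == 0:
--                 counter += 1
--         prev2 = prev1
--         prev1 = arr[i]
--         i += 1
--     return counter
-- ===== SOURCE B (Python) =====
-- def count_digits3(arr):
--     counter = 0
--     run = 0
--     for x in arr:
--         if x == 0:
--             run += 1
--         else:
--             counter += max(0, run - 2)
--             run = 0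
--     counter += max(0, run - 2)
--     return counter
-- ===== Notes on version B (the rewrite author's own statement) =====
-- stated objective: alternative
-- what changed: Replaces the index-based while loop carrying the two previous elements (prev1/prev2) with a single pass over zero-run lengths, adding max(0, L-2) per maximal run of zeros.
import Mathlib
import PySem

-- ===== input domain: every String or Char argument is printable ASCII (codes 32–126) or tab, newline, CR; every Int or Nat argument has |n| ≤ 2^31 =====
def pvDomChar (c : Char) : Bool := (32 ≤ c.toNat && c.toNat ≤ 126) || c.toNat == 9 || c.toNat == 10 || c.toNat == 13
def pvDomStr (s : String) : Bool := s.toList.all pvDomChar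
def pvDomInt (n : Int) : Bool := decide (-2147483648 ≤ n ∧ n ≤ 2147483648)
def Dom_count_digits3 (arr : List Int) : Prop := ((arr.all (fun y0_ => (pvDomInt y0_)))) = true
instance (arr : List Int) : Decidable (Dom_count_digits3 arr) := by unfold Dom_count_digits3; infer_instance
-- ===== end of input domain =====

-- B replaces A's while loop tracking the two previous elements with a zero-run-length scan
-- adding max(0, run-2) per maximal run of zeros (alternative decomposition, same cost).


-- ===== PORT A =====
-- the while loop over i with state (counter, prev1, prev2), transliterated structurally
def countA : List Int → Int → Int → Int → Int
  | [], counter, _, _ => counter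
  | x :: xs, counter, prev1, prev2 =>
    countA xs (if x = 0 ∧ prev1 = 0 ∧ prev2 = 0 then counter + 1 else counter) x prev1

def count_digits3 (arr : List Int) : Int := countA arr 0 2 2

-- ===== PORT B =====
-- the for loop with state (counter, run), then the final flush
def countB : List Int → Int → Int → Int
  | [], counter, run => counter + max 0 (run - 2)
  | x :: xs, counter, run =>
    if x = 0 then countB xs counter (run + 1)
    else countB xs (counter + max 0 (run - 2)) 0

def count_digits3_alt (arr : List Int) : Int := countB arr 0 0

-- ===== PRECONDITION & SPEC =====
def Spec_count_digits3 (arr : List Int) (out : Int) : Prop := out = count_digits3_alt arr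
instance (arr : List Int) (out : Int) : Decidable (Spec_count_digits3 arr out) := by unfold Spec_count_digits3; infer_instance

-- ===== CLAIM (what is proved, stated in full; the proofs are below) =====
def Claim_equal_count_digits3 : Prop := ∀ (arr : List Int), Dom_count_digits3 arr → Spec_count_digits3 arr (count_digits3 arr)

-- ===== LEMMAS AND PROOFS =====
-- Invariant linking A's (counter, prev1, prev2) with B's (counter, run):
-- prev1 = 0 iff the current zero-run has length ≥ 1, (prev1 = 0 ∧ prev2 = 0) iff ≥ 2,
-- and A's counter equals B's flushed counter plus max 0 (run - 2).
theorem countA_eq_countB (xs : List Int) (cb r prev1 prev2 : Int)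
    (hr : 0 ≤ r) (h1 : prev1 = 0 ↔ 1 ≤ r) (h2 : (prev1 = 0 ∧ prev2 = 0) ↔ 2 ≤ r) :
    countA xs (cb + max 0 (r - 2)) prev1 prev2 = countB xs cb r := by
  induction xs generalizing cb r prev1 prev2 with
  | nil => simp [countA, countB]
  | cons x xs ih =>
    simp only [countA, countB]
    by_cases hx : x = 0
    · subst hx
      rw [if_pos rfl]
      have key : (if (0 : Int) = 0 ∧ prev1 = 0 ∧ prev2 = 0 then cb + max 0 (r - 2) + 1
          else cb + max 0 (r - 2)) = cb + max 0 (r + 1 - 2) := by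
        by_cases h : prev1 = 0 ∧ prev2 = 0
        · rw [if_pos ⟨rfl, h⟩]
          have := h2.mp h
          omega
        · rw [if_neg (by tauto)]
          by_cases hp1 : prev1 = 0
          · have hr1 : 1 ≤ r := h1.mp hp1
            have hr2 : ¬ 2 ≤ r := fun hh => h (h2.mpr hh)
            omega
          · have : ¬ 1 ≤ r := fun hh => hp1 (h1.mpr hh)
            omega
      rw [key]
      refine ih cb (r + 1) 0 prev1 (by omega) (by omega) ?_
      constructor
      · rintro ⟨-, hp⟩
        have := h1.mp hp
        omega
      · intro hh
        exact ⟨rfl, h1.mpr (by omega)⟩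
    · rw [if_neg (by tauto), if_neg hx]
      have hB := ih (cb + max 0 (r - 2)) 0 x prev1 le_rfl
        (by constructor
            · intro hh; exact absurd hh hx
            · omega)
        (by constructor
            · intro hh; exact absurd hh.1 hx
            · omega)
      have h0 : cb + max 0 (r - 2) + max 0 ((0:Int) - 2) = cb + max 0 (r - 2) := by omega
      rw [h0] at hB
      exact hB

-- ===== VERDICT (by name: the statement is the Claim_ definition above) =====
theorem count_digits3_spec : Claim_equal_count_digits3 := by
  intro arr _
  unfold Spec_count_digits3 count_digits3 count_digits3_alt
  have := countA_eq_countB arr 0 0 2 2 le_rfl (by omega) (by omega)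
  simpa using this
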